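-- pv_equiv track=rewrite | github.com/Caithir/DeadlockSim | deadlock_sim/data.py | souls_to_boons
-- ===== SOURCE A (Python) =====
-- _SOUL_LEVEL_TABLE: list[tuple[int, int, int]] = [
--     # (threshold_souls, cumulative_boons, cumulative_ability_points)
--     (600,   0,  0),   # Level 0 — ability unlock only
--     (900,   1,  1),
--     (1200,  2,  1),   # ability unlock
--     (1500,  3,  2),
--     (2100,  4,  2),   # ability unlock
--     (2800,  5,  3),
--     (3600,  6,  3),   # ability unlock (ultimate)
--     (4400,  7,  4),
--     (5200,  8,  5),
--     (6000,  9,  6),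
--     (6800, 10,  7),
--     (7700, 11,  8),
--     (8600, 12,  9),
--     (9600, 13, 10),
--     (10600, 14, 11),
--     (11600, 15, 12),
--     (12600, 16, 13),
--     (13800, 17, 14),
--     (15600, 18, 15),
--     (17600, 19, 16),
--     (19600, 20, 17),
--     (21600, 21, 18),
--     (23600, 22, 19),
--     (25600, 23, 20),
--     (27600, 24, 21),
--     (29600, 25, 22),
--     (31600, 26, 23),
--     (33600, 27, 24),
--     (35600, 28, 25),
--     (37600, 29, 26),
--     (39600, 30, 27),
--     (41600, 31, 28),
--     (43600, 32, 29),
--     (45600, 33, 30),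
--     (47600, 34, 31),
--     (49600, 35, 32),
-- ]
--
-- def souls_to_boons(total_souls: int) -> int:
--     """Return cumulative boon count for a given soul total."""
--     result = 0
--     for threshold, boons, _ap in _SOUL_LEVEL_TABLE:
--         if total_souls >= threshold:
--             result = boons
--         else:
--             break
--     return result
-- ===== SOURCE B (Python) =====
-- import bisect
--
-- # Boon-granting soul thresholds: the first one (600) grants 0 boons (ability
-- # unlock only), and every later one grants one more cumulative boon, so the
-- # boon count equals the number of thresholds reached minus one (floored at 0).
-- _THRESHOLDS = [
--     600, 900, 1200, 1500, 2100, 2800, 3600, 4400, 5200, 6000, 6800, 7700,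
--     8600, 9600, 10600, 11600, 12600, 13800, 15600, 17600, 19600, 21600,
--     23600, 25600, 27600, 29600, 31600, 33600, 35600, 37600, 39600, 41600,
--     43600, 45600, 47600, 49600,
-- ]
--
-- def souls_to_boons(total_souls: int) -> int:
--     """Return cumulative boon count for a given soul total."""
--     idx = bisect.bisect_right(_THRESHOLDS, total_souls)
--     return max(idx - 1, 0)
-- ===== Notes on version B (the rewrite author's own statement) =====
-- stated objective: alternative
-- what changed: Replaced A's accumulating forward scan with break over the three-column table by a bisect_right binary search over a bare thresholds list, returning the number of reached thresholds minus one, floored at zero, since the boon count equals the threshold's index.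
import Mathlib
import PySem

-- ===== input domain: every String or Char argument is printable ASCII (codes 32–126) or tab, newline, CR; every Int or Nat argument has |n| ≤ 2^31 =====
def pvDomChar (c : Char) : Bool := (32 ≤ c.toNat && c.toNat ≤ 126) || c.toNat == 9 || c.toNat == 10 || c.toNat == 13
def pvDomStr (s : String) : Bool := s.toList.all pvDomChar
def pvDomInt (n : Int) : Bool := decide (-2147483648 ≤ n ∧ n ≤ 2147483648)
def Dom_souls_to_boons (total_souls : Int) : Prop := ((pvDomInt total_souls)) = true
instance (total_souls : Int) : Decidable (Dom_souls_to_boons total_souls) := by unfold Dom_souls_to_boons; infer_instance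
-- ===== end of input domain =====

-- B replaces A's linear scan-with-break over the 3-column table by bisect_right
-- on a bare thresholds list, returning max(idx - 1, 0) (objective: alternative).

-- ===== PORT A =====
def pvSoulLevelTable : List (Int × Int × Int) := [
  (600, 0, 0),
  (900, 1, 1),
  (1200, 2, 1),
  (1500, 3, 2),
  (2100, 4, 2),
  (2800, 5, 3),
  (3600, 6, 3),
  (4400, 7, 4),
  (5200, 8, 5),
  (6000, 9, 6),
  (6800, 10, 7),
  (7700, 11, 8),
  (8600, 12, 9),
  (9600, 13, 10),
  (10600, 14, 11),
  (11600, 15, 12),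
  (12600, 16, 13),
  (13800, 17, 14),
  (15600, 18, 15),
  (17600, 19, 16),
  (19600, 20, 17),
  (21600, 21, 18),
  (23600, 22, 19),
  (25600, 23, 20),
  (27600, 24, 21),
  (29600, 25, 22),
  (31600, 26, 23),
  (33600, 27, 24),
  (35600, 28, 25),
  (37600, 29, 26),
  (39600, 30, 27),
  (41600, 31, 28),
  (43600, 32, 29),
  (45600, 33, 30),
  (47600, 34, 31),
  (49600, 35, 32)]

-- A's for-loop with break, as structural recursion over the table rows
def pvSoulsLoop (total_souls : Int) : List (Int × Int × Int) → Int → Int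
  | [], result => result
  | (threshold, boons, _ap) :: rest, result =>
    if total_souls ≥ threshold then pvSoulsLoop total_souls rest boons else result

def souls_to_boons (total_souls : Int) : Int :=
  pvSoulsLoop total_souls pvSoulLevelTable 0

-- ===== PORT B =====
-- Source B's bare thresholds list (no boons/ap columns)
def pvThresholds : List Int :=
  [600, 900, 1200, 1500, 2100, 2800, 3600, 4400, 5200, 6000, 6800, 7700,
   8600, 9600, 10600, 11600, 12600, 13800, 15600, 17600, 19600, 21600,
   23600, 25600, 27600, 29600, 31600, 33600, 35600, 37600, 39600, 41600,
   43600, 45600, 47600, 49600]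

-- bisect.bisect_right(a, x) on lo..hi; fuel bounds the halving loop (exact for fuel ≥ hi - lo)
def pvBisectRight (x : Int) (a : List Int) : Nat → Nat → Nat → Nat
  | 0, lo, _ => lo
  | fuel + 1, lo, hi =>
    if lo < hi then
      if x < a.getD ((lo + hi) / 2) 0 then pvBisectRight x a fuel lo ((lo + hi) / 2)
      else pvBisectRight x a fuel ((lo + hi) / 2 + 1) hi
    else lo

def souls_to_boons_alt (total_souls : Int) : Int :=
  let idx := pvBisectRight total_souls pvThresholds pvThresholds.length 0 pvThresholds.length
  max ((idx : Int) - 1) 0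

-- ===== PRECONDITION & SPEC =====
def Spec_souls_to_boons (total_souls : Int) (out : Int) : Prop := out = souls_to_boons_alt total_souls
instance (total_souls : Int) (out : Int) : Decidable (Spec_souls_to_boons total_souls out) := by unfold Spec_souls_to_boons; infer_instance

-- ===== CLAIM (what is proved, stated in full; the proofs are below) =====
def Claim_equal_souls_to_boons : Prop := ∀ (total_souls : Int), Dom_souls_to_boons total_souls → Spec_souls_to_boons total_souls (souls_to_boons total_souls)

-- ===== LEMMAS AND PROOFS =====

-- number of elements of a that are ≤ x
def pvCnt (x : Int) (a : List Int) : Nat := a.countP (fun th => decide (th ≤ x))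

theorem pvCnt_cons (x b : Int) (rest : List Int) :
    pvCnt x (b :: rest) = (if b ≤ x then 1 else 0) + pvCnt x rest := by
  simp only [pvCnt, List.countP_cons, decide_eq_true_eq]
  split_ifs <;> omega

theorem pvCnt_le_length (x : Int) (a : List Int) : pvCnt x a ≤ a.length :=
  List.countP_le_length

theorem pvCnt_eq_zero (x : Int) (a : List Int) (h : ∀ y ∈ a, x < y) : pvCnt x a = 0 := by
  simp only [pvCnt, List.countP_eq_zero]
  intro y hy
  simpa using not_le.mpr (h y hy)

-- in a sorted list the elements ≤ x form a prefix of length pvCnt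
theorem pvPrefix (x : Int) : ∀ (a : List Int), a.Pairwise (· ≤ ·) →
    ∀ (i : Nat) (h : i < a.length), (a[i] ≤ x ↔ i < pvCnt x a) := by
  intro a
  induction a with
  | nil => intro _ i h; simp at h
  | cons b rest ih =>
    intro hp i h
    rw [List.pairwise_cons] at hp
    rw [pvCnt_cons]
    cases i with
    | zero =>
      simp only [List.getElem_cons_zero]
      constructor
      · intro hb; rw [if_pos hb]; omega
      · intro hc
        by_contra hb
        rw [if_neg hb] at hc
        have h0 : pvCnt x rest = 0 :=
          pvCnt_eq_zero x rest (fun y hy => lt_of_lt_of_le (not_le.mp hb) (hp.1 y hy))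
        omega
    | succ j =>
      simp only [List.getElem_cons_succ]
      have hj : j < rest.length := by simpa using h
      have := ih hp.2 j hj
      by_cases hb : b ≤ x
      · rw [if_pos hb]; omega
      · rw [if_neg hb]
        have hbj : b ≤ rest[j] := hp.1 _ (List.getElem_mem hj)
        have h0 : pvCnt x rest = 0 :=
          pvCnt_eq_zero x rest (fun y hy => lt_of_lt_of_le (not_le.mp hb) (hp.1 y hy))
        constructor
        · intro hle; exact absurd (le_trans hbj hle) hb
        · omega

-- bisect_right on a sorted list returns pvCnt, given the loop invariant
theorem pvBis_eq (x : Int) (a : List Int) (hs : a.Pairwise (· ≤ ·)) :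
    ∀ (fuel lo hi : Nat), hi ≤ a.length → lo ≤ pvCnt x a → pvCnt x a ≤ hi →
      hi - lo ≤ fuel → pvBisectRight x a fuel lo hi = pvCnt x a := by
  intro fuel
  induction fuel with
  | zero => intro lo hi _ h1 h2 h3; simp only [pvBisectRight]; omega
  | succ f ih =>
    intro lo hi hlen h1 h2 h3
    by_cases hlh : lo < hi
    · have hmid : (lo + hi) / 2 < a.length := by omega
      have hget : a.getD ((lo + hi) / 2) 0 = a[(lo + hi) / 2] := by
        simp [List.getD, List.getElem?_eq_getElem hmid]
      have hpref := pvPrefix x a hs ((lo + hi) / 2) hmid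
      by_cases hx : x < a.getD ((lo + hi) / 2) 0
      · have hnle : ¬ a[(lo + hi) / 2] ≤ x := by rw [hget] at hx; omega
        have hcnt : pvCnt x a ≤ (lo + hi) / 2 := by
          by_contra hc
          exact hnle (hpref.mpr (by omega))
        simp only [pvBisectRight, if_pos hlh, if_pos hx]
        exact ih lo ((lo + hi) / 2) (by omega) h1 hcnt (by omega)
      · have hle : a[(lo + hi) / 2] ≤ x := by rw [hget] at hx; omega
        have hcnt : (lo + hi) / 2 < pvCnt x a := hpref.mp hle
        simp only [pvBisectRight, if_pos hlh, if_neg hx]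
        exact ih ((lo + hi) / 2 + 1) hi hlen (by omega) h2 (by omega)
    · simp only [pvBisectRight, if_neg hlh]; omega

-- A's loop on a sorted table, characterised by pvCnt over the threshold column
theorem pvLoop_char (t : Int) : ∀ (rows : List (Int × Int × Int)) (r : Int),
    rows.Pairwise (fun p q => p.1 ≤ q.1) →
    pvSoulsLoop t rows r =
      if pvCnt t (rows.map (·.1)) = 0 then r
      else (rows.getD (pvCnt t (rows.map (·.1)) - 1) (0, 0, 0)).2.1 := by
  intro rows
  induction rows with
  | nil => intro r _; simp [pvSoulsLoop, pvCnt]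
  | cons row rest ih =>
    intro r hp
    obtain ⟨th, b, ap⟩ := row
    rw [List.pairwise_cons] at hp
    simp only [List.map_cons, pvCnt_cons]
    by_cases hth : th ≤ t
    · rw [pvSoulsLoop, if_pos (by exact hth)]
      rw [ih b hp.2]
      rw [if_pos hth]
      by_cases h0 : pvCnt t (rest.map (·.1)) = 0
      · simp [h0, List.getD]
      · rw [if_neg h0, if_neg (by omega)]
        have : 1 + pvCnt t (rest.map (·.1)) - 1 = (pvCnt t (rest.map (·.1)) - 1) + 1 := by omega
        rw [this]
        simp [List.getD]
    · rw [pvSoulsLoop, if_neg (by exact fun h => hth (by omega))]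
      have h0 : pvCnt t (rest.map (·.1)) = 0 := by
        apply pvCnt_eq_zero
        intro y hy
        obtain ⟨p, hpmem, hpy⟩ := List.mem_map.mp hy
        have := hp.1 p hpmem
        omega
      rw [if_neg hth, if_pos (by omega)]

-- ===== VERDICT (by name: the statement is the Claim_ definition above) =====
set_option maxHeartbeats 4000000 in
theorem souls_to_boons_spec : Claim_equal_souls_to_boons := by
  intro t _
  unfold Spec_souls_to_boons souls_to_boons souls_to_boons_alt
  have hsorted : pvSoulLevelTable.Pairwise (fun p q => p.1 ≤ q.1) := by decide
  have hsth : pvThresholds.Pairwise (· ≤ ·) := by decide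
  have hmap : pvSoulLevelTable.map (·.1) = pvThresholds := by decide
  have hb := pvBis_eq t pvThresholds hsth pvThresholds.length 0 pvThresholds.length
    (le_refl _) (Nat.zero_le _) (pvCnt_le_length t pvThresholds) (by omega)
  have hcol : ∀ i : Fin 36, (pvSoulLevelTable.getD i.val (0, 0, 0)).2.1 = (i.val : Int) := by
    decide
  rw [pvLoop_char t pvSoulLevelTable 0 hsorted, hmap]
  simp only [hb]
  have hle : pvCnt t pvThresholds ≤ 36 := pvCnt_le_length t pvThresholds
  by_cases h0 : pvCnt t pvThresholds = 0
  · simp [h0]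
  · rw [if_neg h0]
    rw [hcol ⟨pvCnt t pvThresholds - 1, by omega⟩]
    simp only []
    omega
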